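-- pv_equiv track=rewrite | github.com/markramm/pyrite | scripts/scrape_appointee_details.py | extract_liabilities
-- ===== SOURCE A (Python) =====
-- def extract_liabilities(table: dict | None) -> list[dict]:
--     """Extract liabilities."""
--     if not table:
--         return []
--     liabilities = []
--     for row in table["rows"]:
--         if len(row) < 2:
--             continue
--         creditor = row[0].strip()
--         desc = row[1].strip()
--         if not creditor:
--             continue
--
--         # Parse "type: Capital Commitment, amount: $1,000,001 - $5,000,000, year-incurred: 2019, term: Life of Fund"
--         liability_type = ""
--         amount = ""
--         year = ""
--         term = ""
--         rate = ""
--         for part in desc.split(", "):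
--             part = part.strip()
--             if part.startswith("type:"):
--                 liability_type = part[5:].strip()
--             elif part.startswith("amount:"):
--                 amount = part[7:].strip()
--             elif part.startswith("year-incurred:"):
--                 year = part[14:].strip()
--             elif part.startswith("term:"):
--                 term = part[5:].strip()
--             elif part.startswith("rate:"):
--                 rate = part[5:].strip()
--
--         liabilities.append({
--             "creditor": creditor,
--             "liability_type": liability_type,
--             "amount_range": amount,
--             "year_incurred": year,
--             "term": term,
--             "rate": rate,
--             "description": desc,
--         })
--     return liabilities
-- ===== SOURCE B (Python) =====
-- _FIELD_PREFIXES = [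
--     ("liability_type", "type:"),
--     ("amount_range", "amount:"),
--     ("year_incurred", "year-incurred:"),
--     ("term", "term:"),
--     ("rate", "rate:"),
-- ]
--
--
-- def _last_field(parts, prefix):
--     """Value of the last part carrying this prefix, stripped; '' if none."""
--     for p in reversed(parts):
--         if p.startswith(prefix):
--             return p[len(prefix):].strip()
--     return ""
--
--
-- def extract_liabilities(table):
--     """Extract liabilities."""
--     if not table:
--         return []
--     result = []
--     for row in table["rows"]:
--         if len(row) >= 2 and row[0].strip():
--             creditor = row[0].strip()
--             desc = row[1].strip()
--             parts = [p.strip() for p in desc.split(", ")]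
--             rec = {"creditor": creditor}
--             for name, prefix in _FIELD_PREFIXES:
--                 rec[name] = _last_field(parts, prefix)
--             rec["description"] = desc
--             result.append(rec)
--     return result
-- ===== Notes on version B (the rewrite author's own statement) =====
-- stated objective: alternative
-- what changed: A parses each description in one pass through the parts with an if/elif prefix dispatch into five accumulator variables; B instead strips the parts once and, for each of the five fields, searches the parts backwards for the last part carrying that field's prefix (last match wins, matching A's overwrites), building each record from those per-field searches.
import Mathlib
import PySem

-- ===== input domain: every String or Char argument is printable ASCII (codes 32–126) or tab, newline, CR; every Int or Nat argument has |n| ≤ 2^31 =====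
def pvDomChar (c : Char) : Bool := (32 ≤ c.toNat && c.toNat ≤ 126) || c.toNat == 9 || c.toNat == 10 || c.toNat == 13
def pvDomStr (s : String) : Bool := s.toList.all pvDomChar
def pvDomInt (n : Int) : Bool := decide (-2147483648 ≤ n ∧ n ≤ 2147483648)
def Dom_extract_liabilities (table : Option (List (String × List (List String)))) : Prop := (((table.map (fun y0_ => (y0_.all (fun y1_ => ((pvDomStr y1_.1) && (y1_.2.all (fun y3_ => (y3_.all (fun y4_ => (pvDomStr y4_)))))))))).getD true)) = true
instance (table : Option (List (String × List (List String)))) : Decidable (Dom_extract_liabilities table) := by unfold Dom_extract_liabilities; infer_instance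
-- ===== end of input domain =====

-- B replaces A's per-part if/elif dispatch into five accumulators by a per-field
-- backwards search over the stripped parts (last match wins, as A's overwrites do);
-- objective: alternative (same cost, different traversal).

-- ===== PORT A =====
-- the body of A's inner 'for part in desc.split(", ")' loop, on the 5-tuple
-- (liability_type, amount, year, term, rate)
def stepA (st : String × String × String × String × String) (part0 : String) :
    String × String × String × String × String :=
  let part := PySem.Str.strip part0
  if PySem.Str.startswith part "type:" then
    (PySem.Str.strip (PySem.Str.slice part (some 5) none), st.2.1, st.2.2.1, st.2.2.2.1, st.2.2.2.2)
  else if PySem.Str.startswith part "amount:" then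
    (st.1, PySem.Str.strip (PySem.Str.slice part (some 7) none), st.2.2.1, st.2.2.2.1, st.2.2.2.2)
  else if PySem.Str.startswith part "year-incurred:" then
    (st.1, st.2.1, PySem.Str.strip (PySem.Str.slice part (some 14) none), st.2.2.2.1, st.2.2.2.2)
  else if PySem.Str.startswith part "term:" then
    (st.1, st.2.1, st.2.2.1, PySem.Str.strip (PySem.Str.slice part (some 5) none), st.2.2.2.2)
  else if PySem.Str.startswith part "rate:" then
    (st.1, st.2.1, st.2.2.1, st.2.2.2.1, PySem.Str.strip (PySem.Str.slice part (some 5) none))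
  else st

-- the body of A's 'for row in table["rows"]' loop ('continue' = keep the accumulator)
def stepRowA (liabilities : List (List (String × String))) (row : List String) :
    List (List (String × String)) :=
  if row.length < 2 then liabilities
  else
    let creditor := PySem.Str.strip ((PySem.List.pyGet? row 0).getD "")
    let desc := PySem.Str.strip ((PySem.List.pyGet? row 1).getD "")
    if creditor = "" then liabilities
    else
      let st := ((PySem.Str.split? desc ", ").getD []).foldl stepA ("", "", "", "", "")
      liabilities ++ [[("creditor", creditor), ("liability_type", st.1), ("amount_range", st.2.1),
        ("year_incurred", st.2.2.1), ("term", st.2.2.2.1), ("rate", st.2.2.2.2),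
        ("description", desc)]]

def extract_liabilities (table : Option (List (String × List (List String)))) :
    List (List (String × String)) :=
  match table with
  | none => []
  | some t =>
    if t = [] then []
    else ((PySem.Dict.get? (PySem.Dict.mk t) "rows").getD []).foldl stepRowA []

-- ===== PORT B =====
def pvFieldPrefixes : List (String × String) :=
  [("liability_type", "type:"), ("amount_range", "amount:"), ("year_incurred", "year-incurred:"),
   ("term", "term:"), ("rate", "rate:")]

-- _last_field: value of the last part carrying this prefix, stripped; "" if none
def lastField (parts : List String) (pref : String) : String :=
  match parts.reverse.find? (fun q => PySem.Str.startswith q pref) with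
  | some q => PySem.Str.strip (PySem.Str.slice q (some (PySem.Str.len pref)) none)
  | none => ""

def stepRowB (result : List (List (String × String))) (row : List String) :
    List (List (String × String)) :=
  if 2 ≤ row.length ∧ PySem.Str.strip ((PySem.List.pyGet? row 0).getD "") ≠ "" then
    let creditor := PySem.Str.strip ((PySem.List.pyGet? row 0).getD "")
    let desc := PySem.Str.strip ((PySem.List.pyGet? row 1).getD "")
    let parts := ((PySem.Str.split? desc ", ").getD []).map PySem.Str.strip
    result ++ [("creditor", creditor) ::
      (pvFieldPrefixes.map (fun np => (np.1, lastField parts np.2)) ++ [("description", desc)])]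
  else result

def extract_liabilities_alt (table : Option (List (String × List (List String)))) :
    List (List (String × String)) :=
  match table with
  | none => []
  | some t =>
    if t = [] then []
    else ((PySem.Dict.get? (PySem.Dict.mk t) "rows").getD []).foldl stepRowB []

-- ===== PRECONDITION & SPEC =====
-- Pre_ excludes only the inputs on which A raises: a non-empty dict without a "rows"
-- key (table["rows"] is a KeyError; B raises there too).
def Pre_extract_liabilities (table : Option (List (String × List (List String)))) : Prop :=
  table.getD [] = [] ∨ "rows" ∈ (table.getD []).map Prod.fst
instance (table : Option (List (String × List (List String)))) : Decidable (Pre_extract_liabilities table) := by unfold Pre_extract_liabilities; infer_instance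

def pvWitness_extract_liabilities : (Option (List (String × List (List String)))) :=
  some [("rows", [["Acme Bank", "type: Loan, amount: $10,001 - $15,000"]])]

def Spec_extract_liabilities (table : Option (List (String × List (List String)))) (out : List (List (String × String))) : Prop := out = extract_liabilities_alt table
instance (table : Option (List (String × List (List String)))) (out : List (List (String × String))) : Decidable (Spec_extract_liabilities table out) := by unfold Spec_extract_liabilities; infer_instance

-- ===== CLAIM (what is proved, stated in full; the proofs are below) =====
def Claim_equal_extract_liabilities : Prop := ∀ (table : Option (List (String × List (List String)))), Dom_extract_liabilities table → Pre_extract_liabilities table → Spec_extract_liabilities table (extract_liabilities table)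

-- ===== LEMMAS AND PROOFS =====

-- proof helpers: the per-field view of A's accumulator loop
def fieldStep (p0 pref : String) (n : Int) (d : String) : String :=
  if PySem.Str.startswith (PySem.Str.strip p0) pref then
    PySem.Str.strip (PySem.Str.slice (PySem.Str.strip p0) (some n) none)
  else d

def fieldOf (l : List String) (pref : String) (n : Int) (d : String) : String :=
  match (l.map PySem.Str.strip).reverse.find? (fun q => PySem.Str.startswith q pref) with
  | some q => PySem.Str.strip (PySem.Str.slice q (some n) none)
  | none => d

lemma lastField_map_strip (l : List String) (pref : String) :
    lastField (l.map PySem.Str.strip) pref = fieldOf l pref (PySem.Str.len pref) "" := rfl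

lemma fieldOf_cons (l : List String) (p pref : String) (n : Int) (d : String) :
    fieldOf (p :: l) pref n d = fieldOf l pref n (fieldStep p pref n d) := by
  unfold fieldOf fieldStep
  simp only [List.map_cons, List.reverse_cons, List.find?_append]
  cases hfind : (l.map PySem.Str.strip).reverse.find? (fun q => PySem.Str.startswith q pref) with
  | some q => simp
  | none =>
    simp only [Option.none_or, List.find?_cons, List.find?_nil]
    cases hsw : PySem.Str.startswith (PySem.Str.strip p) pref
    · rfl
    · rfl

-- two prefixes neither of which is a prefix of the other never match the same string
lemma sw_excl {s a b : String} (h1 : ¬ a.toList <+: b.toList) (h2 : ¬ b.toList <+: a.toList)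
    (ha : PySem.Str.startswith s a = true) : PySem.Str.startswith s b = false := by
  cases hb : PySem.Str.startswith s b
  · rfl
  · exfalso
    rw [PySem.Str.startswith_eq, PySem.Chars.startswith_iff] at ha hb
    rcases List.prefix_or_prefix_of_prefix ha hb with h | h
    · exact h1 h
    · exact h2 h

lemma stepA_eq (st : String × String × String × String × String) (p0 : String) :
    stepA st p0 = (fieldStep p0 "type:" 5 st.1, fieldStep p0 "amount:" 7 st.2.1,
      fieldStep p0 "year-incurred:" 14 st.2.2.1, fieldStep p0 "term:" 5 st.2.2.2.1,
      fieldStep p0 "rate:" 5 st.2.2.2.2) := by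
  simp only [stepA, fieldStep]
  by_cases h1 : PySem.Str.startswith (PySem.Str.strip p0) "type:" = true
  · have e2 := sw_excl (by decide) (by decide) h1 (b := "amount:")
    have e3 := sw_excl (by decide) (by decide) h1 (b := "year-incurred:")
    have e4 := sw_excl (by decide) (by decide) h1 (b := "term:")
    have e5 := sw_excl (by decide) (by decide) h1 (b := "rate:")
    simp only [h1, e2, e3, e4, e5, Bool.false_eq_true, if_true, if_false]
  · simp only [Bool.not_eq_true] at h1
    by_cases h2 : PySem.Str.startswith (PySem.Str.strip p0) "amount:" = true
    · have e3 := sw_excl (by decide) (by decide) h2 (b := "year-incurred:")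
      have e4 := sw_excl (by decide) (by decide) h2 (b := "term:")
      have e5 := sw_excl (by decide) (by decide) h2 (b := "rate:")
      simp only [h1, h2, e3, e4, e5, Bool.false_eq_true, if_true, if_false]
    · simp only [Bool.not_eq_true] at h2
      by_cases h3 : PySem.Str.startswith (PySem.Str.strip p0) "year-incurred:" = true
      · have e4 := sw_excl (by decide) (by decide) h3 (b := "term:")
        have e5 := sw_excl (by decide) (by decide) h3 (b := "rate:")
        simp only [h1, h2, h3, e4, e5, Bool.false_eq_true, if_true, if_false]
      · simp only [Bool.not_eq_true] at h3
        by_cases h4 : PySem.Str.startswith (PySem.Str.strip p0) "term:" = true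
        · have e5 := sw_excl (by decide) (by decide) h4 (b := "rate:")
          simp only [h1, h2, h3, h4, e5, Bool.false_eq_true, if_true, if_false]
        · simp only [Bool.not_eq_true] at h4
          by_cases h5 : PySem.Str.startswith (PySem.Str.strip p0) "rate:" = true
          · simp only [h1, h2, h3, h4, h5, Bool.false_eq_true, if_true, if_false]
          · simp only [Bool.not_eq_true] at h5
            simp only [h1, h2, h3, h4, h5, Bool.false_eq_true, if_false]

lemma foldl_stepA (l : List String) : ∀ st : String × String × String × String × String,
    l.foldl stepA st = (fieldOf l "type:" 5 st.1, fieldOf l "amount:" 7 st.2.1,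
      fieldOf l "year-incurred:" 14 st.2.2.1, fieldOf l "term:" 5 st.2.2.2.1,
      fieldOf l "rate:" 5 st.2.2.2.2) := by
  induction l with
  | nil => intro st; rfl
  | cons p l ih =>
    intro st
    rw [List.foldl_cons, ih, stepA_eq]
    simp only [fieldOf_cons]

lemma foldl_stepA_zero (l : List String) :
    l.foldl stepA ("", "", "", "", "") =
      (lastField (l.map PySem.Str.strip) "type:", lastField (l.map PySem.Str.strip) "amount:",
       lastField (l.map PySem.Str.strip) "year-incurred:", lastField (l.map PySem.Str.strip) "term:",
       lastField (l.map PySem.Str.strip) "rate:") := by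
  rw [foldl_stepA]
  have h1 : PySem.Str.len "type:" = 5 := by decide
  have h2 : PySem.Str.len "amount:" = 7 := by decide
  have h3 : PySem.Str.len "year-incurred:" = 14 := by decide
  have h4 : PySem.Str.len "term:" = 5 := by decide
  have h5 : PySem.Str.len "rate:" = 5 := by decide
  simp only [lastField_map_strip, h1, h2, h3, h4, h5]

lemma stepRow_eq (acc : List (List (String × String))) (row : List String) :
    stepRowA acc row = stepRowB acc row := by
  simp only [stepRowA, stepRowB]
  by_cases h2 : row.length < 2
  · rw [if_pos h2, if_neg (by rintro ⟨hlen, _⟩; omega)]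
  · rw [if_neg h2]
    by_cases hc : PySem.Str.strip ((PySem.List.pyGet? row 0).getD "") = ""
    · rw [if_pos hc, if_neg (by rintro ⟨_, hne⟩; exact hne hc)]
    · rw [if_neg hc, if_pos ⟨by omega, hc⟩]
      rw [foldl_stepA_zero]
      simp [pvFieldPrefixes]

-- ===== VERDICT (by name: the statement is the Claim_ definition above) =====
theorem extract_liabilities_spec : Claim_equal_extract_liabilities := by
  intro table _ _
  unfold Spec_extract_liabilities
  cases table with
  | none => rfl
  | some t =>
    show (if t = [] then []
        else ((PySem.Dict.get? (PySem.Dict.mk t) "rows").getD []).foldl stepRowA []) =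
      (if t = [] then []
        else ((PySem.Dict.get? (PySem.Dict.mk t) "rows").getD []).foldl stepRowB [])
    by_cases ht : t = []
    · rw [if_pos ht, if_pos ht]
    · rw [if_neg ht, if_neg ht,
        show stepRowA = stepRowB from funext fun a => funext fun r => stepRow_eq a r]
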